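-- pv_equiv track=rewrite | github.com/finorak/Python-module03 | ex3/ft_achivement_tracker.py | get_rare_achievements
-- ===== SOURCE A (Python) =====
-- def is_duplicate(achievements: list[str], curr_achievement: str) -> bool:
--     counter = 0
--     for achievement in achievements:
--         if curr_achievement == achievement:
--             counter += 1
--         if counter > 1:
--             return True
--     return False
--
-- def in_other_player(data: dict, curr_player: str, achievement: str) -> bool:
--     for player in data:
--         if player == curr_player:
--             continue
--         if achievement in data[player]:
--             return True
--     return False
--
-- def get_rare_achievements(data: dict[str, list[str]]) -> set | None:
--     rare = []
--     for player in data: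
--         for achievement in data[player]:
--             if is_duplicate(data[player], achievement):
--                 break
--             if in_other_player(data, player, achievement):
--                 break
--             rare += [achievement]
--     return set(rare) if rare else None
-- ===== SOURCE B (Python) =====
-- def get_rare_achievements(data: dict[str, list[str]]) -> set | None:
--     # one pass precomputation: how many players own each achievement
--     owners = {}
--     for achievements in data.values():
--         for a in set(achievements):
--             owners[a] = owners.get(a, 0) + 1
--     rare = set()
--     for achievements in data.values():
--         counts = {}
--         for a in achievements:
--             counts[a] = counts.get(a, 0) + 1
--         for a in achievements:
--             if counts[a] > 1 or owners[a] > 1: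
--                 break
--             rare.add(a)
--     return rare if rare else None
-- ===== Notes on version B (the rewrite author's own statement) =====
-- stated objective: faster
-- what changed: Replaced A's per-achievement rescans (is_duplicate over the player's list and in_other_player over all players) by a precomputed global achievement->owner-count dict plus a per-player occurrence counter, so each achievement is checked in O(1).
import Mathlib
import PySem

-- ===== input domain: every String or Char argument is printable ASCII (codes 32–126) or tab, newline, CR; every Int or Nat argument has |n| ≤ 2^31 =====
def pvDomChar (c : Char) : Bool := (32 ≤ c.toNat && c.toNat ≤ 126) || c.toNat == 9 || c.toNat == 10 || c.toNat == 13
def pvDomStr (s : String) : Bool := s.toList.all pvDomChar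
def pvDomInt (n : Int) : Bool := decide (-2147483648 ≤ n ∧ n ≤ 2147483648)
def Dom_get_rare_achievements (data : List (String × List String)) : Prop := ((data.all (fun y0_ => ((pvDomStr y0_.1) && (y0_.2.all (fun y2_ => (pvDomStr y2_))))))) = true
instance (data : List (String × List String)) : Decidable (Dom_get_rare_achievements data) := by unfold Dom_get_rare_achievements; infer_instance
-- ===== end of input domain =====

-- B replaces A's per-achievement rescans (is_duplicate / in_other_player) by a precomputed
-- global achievement→owner-count map and a per-player counter, O(total) instead of O(total·(n+players·m)).

-- ===== PORT A =====
def isDupGo (achievements : List String) (curr : String) (counter : Int) : Bool :=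
  match achievements with
  | [] => false
  | a :: rest =>
    let counter' := if curr == a then counter + 1 else counter
    if 1 < counter' then true else isDupGo rest curr counter'

def is_duplicate (achievements : List String) (curr_achievement : String) : Bool :=
  isDupGo achievements curr_achievement 0

def inOtherGo (data rest : List (String × List String)) (curr_player achievement : String) : Bool :=
  match rest with
  | [] => false
  | e :: rest' =>
    if e.1 == curr_player then inOtherGo data rest' curr_player achievement
    -- data[player]: key always present when data's keys are the loop's keys (Pre_: distinct keys)
    else if ((PySem.Dict.mk data).getD e.1 []).contains achievement then true
    else inOtherGo data rest' curr_player achievement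

def in_other_player (data : List (String × List String)) (curr_player achievement : String) : Bool :=
  inOtherGo data data curr_player achievement

def rareGo (data : List (String × List String)) (player : String) (achs rare : List String) : List String :=
  match achs with
  | [] => rare
  | a :: rest =>
    if is_duplicate ((PySem.Dict.mk data).getD player []) a then rare
    else if in_other_player data player a then rare
    else rareGo data player rest (rare ++ [a])

def get_rare_achievements (data : List (String × List String)) : Option (List String) :=
  let rare := data.foldl (fun rare e => rareGo data e.1 ((PySem.Dict.mk data).getD e.1 []) rare) []
  if rare.isEmpty then none else some (PySem.Set.ofList rare)

-- ===== PORT B =====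
def bCollect (achs : List String) (counts owners : PySem.Dict String Int) (rare : PySem.Set String) : PySem.Set String :=
  match achs with
  | [] => rare
  | a :: rest =>
    -- counts[a] / owners[a]: keys always present (a comes from the player's list); getD is exact here
    if decide (1 < counts.getD a 0) || decide (1 < owners.getD a 0) then rare
    else bCollect rest counts owners (PySem.Set.add rare a)

def get_rare_achievements_alt (data : List (String × List String)) : Option (List String) :=
  let owners := data.foldl
    (fun d e => (PySem.Set.ofList e.2).foldl (fun d x => d.insert x (d.getD x 0 + 1)) d)
    PySem.Dict.empty
  let rare := data.foldl
    (fun rare e =>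
      bCollect e.2 (e.2.foldl (fun d x => d.insert x (d.getD x 0 + 1)) PySem.Dict.empty) owners rare)
    ([] : PySem.Set String)
  if rare.isEmpty then none else some rare

-- ===== PRECONDITION & SPEC =====
-- Pre_ requires pairwise-distinct keys: a Python dict cannot contain a duplicate key, so an
-- association list with a repeated key represents no input A ever receives.
def Pre_get_rare_achievements (data : List (String × List String)) : Prop :=
  (data.map Prod.fst).Nodup

instance (data : List (String × List String)) : Decidable (Pre_get_rare_achievements data) := by
  unfold Pre_get_rare_achievements; infer_instance

def pvWitness_get_rare_achievements : (List (String × List String)) :=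
  [("alice", ["slay", "win"]), ("bob", ["win"])]

def Spec_get_rare_achievements (data : List (String × List String)) (out : Option (List String)) : Prop := out = get_rare_achievements_alt data
instance (data : List (String × List String)) (out : Option (List String)) : Decidable (Spec_get_rare_achievements data out) := by unfold Spec_get_rare_achievements; infer_instance

-- ===== CLAIM (what is proved, stated in full; the proofs are below) =====
def Claim_equal_get_rare_achievements : Prop := ∀ (data : List (String × List String)), Dom_get_rare_achievements data → Pre_get_rare_achievements data → Spec_get_rare_achievements data (get_rare_achievements data)

-- ===== LEMMAS AND PROOFS =====

-- the per-player "kept prefix": achievements up to the first one that is repeated in the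
-- player's own list or owned by more than one entry
def keepPred (data : List (String × List String)) (l : List String) (a : String) : Bool :=
  !(decide (1 < ((l.count a : Nat) : Int)) || decide (1 < ((data.countP (fun e' => e'.2.contains a) : Nat) : Int)))

def keptPrefix (data : List (String × List String)) (e : String × List String) : List String :=
  e.2.takeWhile (keepPred data e.2)

theorem takeWhile_congr_mem {α : Type} (l : List α) (f g : α → Bool)
    (h : ∀ a ∈ l, f a = g a) : l.takeWhile f = l.takeWhile g := by
  induction l with
  | nil => rfl
  | cons a t ih =>
    simp only [List.takeWhile_cons, h a (List.mem_cons_self)]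
    rw [ih (fun x hx => h x (List.mem_cons_of_mem _ hx))]

theorem isDupGo_eq (l : List String) (curr : String) (c : Int) (h0 : 0 ≤ c) (h1 : c ≤ 1) :
    isDupGo l curr c = decide (1 < c + (l.count curr : Int)) := by
  induction l generalizing c with
  | nil =>
    show false = decide (1 < c + (([] : List String).count curr : Int))
    rw [eq_comm, decide_eq_false_iff_not]
    simp only [List.count_nil, Nat.cast_zero, add_zero]
    omega
  | cons a t ih =>
    cases hca : curr == a with
    | true =>
      have ha : a = curr := (beq_iff_eq.mp hca).symm
      subst ha
      have hcnt : ((a :: t).count a : Int) = (t.count a : Int) + 1 := by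
        simp
      simp only [isDupGo, hca]
      rw [if_pos trivial]
      by_cases hc : (1:Int) < c + 1
      · rw [if_pos (by simpa using hc), eq_comm, decide_eq_true_eq, hcnt]
        omega
      · rw [if_neg (by simpa using hc), ih (c + 1) (by omega) (by omega), hcnt,
          decide_eq_decide]
        omega
    | false =>
      have hac : (a == curr) = false := by
        rw [beq_eq_false_iff_ne]
        intro h
        rw [h] at hca
        simp at hca
      have hcnt : ((a :: t).count curr : Int) = (t.count curr : Int) := by
        simp [List.count_cons, hac]
      simp only [isDupGo, hca, Bool.false_eq_true, if_false]
      rw [if_neg (by simpa using (show ¬ (1:Int) < c by omega)), ih c h0 h1, hcnt]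

theorem is_duplicate_eq (l : List String) (a : String) :
    is_duplicate l a = decide (1 < ((l.count a : Nat) : Int)) := by
  rw [is_duplicate, isDupGo_eq l a 0 (by omega) (by omega)]
  norm_num

theorem getD_entry (data : List (String × List String)) (p : String) (l : List String)
    (hnd : (data.map Prod.fst).Nodup) (hm : (p, l) ∈ data) :
    (PySem.Dict.mk data).getD p [] = l := by
  apply PySem.Dict.getD_of_get?_eq_some
  apply PySem.Dict.get?_of_mem_items (d := PySem.Dict.mk data) hm
  simpa [PySem.Dict.keys, PySem.Dict.items] using hnd

theorem inOtherGo_any (data rest : List (String × List String)) (p a : String) :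
    inOtherGo data rest p a =
      rest.any (fun e => !(e.1 == p) && ((PySem.Dict.mk data).getD e.1 []).contains a) := by
  induction rest with
  | nil => rfl
  | cons e t ih =>
    rw [List.any_cons, ← ih]
    cases h1 : e.1 == p with
    | true =>
      rw [show inOtherGo data (e :: t) p a = inOtherGo data t p a by
        simp [inOtherGo, h1]]
      rw [Bool.not_true, Bool.false_and, Bool.false_or]
    | false =>
      cases h2 : ((PySem.Dict.mk data).getD e.1 []).contains a with
      | true =>
        rw [show inOtherGo data (e :: t) p a = true by
          have h2' : a ∈ (PySem.Dict.mk data).getD e.1 [] := by simpa using h2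
          simp [inOtherGo, h1, h2']]
        simp
      | false =>
        rw [show inOtherGo data (e :: t) p a = inOtherGo data t p a by
          have h2' : a ∉ (PySem.Dict.mk data).getD e.1 [] := by simpa using h2
          simp [inOtherGo, h1, h2']]
        simp

theorem getD_entry' (data : List (String × List String)) (e : String × List String)
    (hnd : (data.map Prod.fst).Nodup) (hm : e ∈ data) :
    (PySem.Dict.mk data).getD e.1 [] = e.2 :=
  getD_entry data e.1 e.2 hnd (by simpa using hm)

theorem in_other_eq (data : List (String × List String)) (p : String) (l : List String)
    (a : String) (hnd : (data.map Prod.fst).Nodup) (hm : (p, l) ∈ data) (ha : a ∈ l) :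
    in_other_player data p a
      = decide (1 < ((data.countP (fun e' => e'.2.contains a) : Nat) : Int)) := by
  rw [in_other_player, inOtherGo_any, Bool.eq_iff_iff, List.any_eq_true, decide_eq_true_eq]
  obtain ⟨s, t, hst⟩ := List.append_of_mem hm
  have hps : p ∉ (s.map Prod.fst) ∧ p ∉ (t.map Prod.fst) := by
    rw [hst, List.map_append, List.map_cons] at hnd
    have h1 := List.nodup_append.mp hnd
    exact ⟨fun hc => h1.2.2 p hc p List.mem_cons_self rfl, (List.nodup_cons.mp h1.2.1).1⟩
  have hq : (fun e' : String × List String => e'.2.contains a) (p, l) = true := by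
    show l.contains a = true
    simpa using ha
  have hcnt : data.countP (fun e' => e'.2.contains a)
      = s.countP (fun e' => e'.2.contains a) + 1 + t.countP (fun e' => e'.2.contains a) := by
    rw [hst, List.countP_append, List.countP_cons, if_pos hq]
    omega
  constructor
  · rintro ⟨e, hme, hb⟩
    rw [Bool.and_eq_true, Bool.not_eq_true', beq_eq_false_iff_ne] at hb
    obtain ⟨hne, hc⟩ := hb
    rw [getD_entry' data e hnd hme] at hc
    have hqe : (fun e' : String × List String => e'.2.contains a) e = true := hc
    have hst' : e ∈ s ∨ e ∈ t := by
      rw [hst] at hme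
      rcases List.mem_append.mp hme with h | h
      · exact Or.inl h
      · rcases List.mem_cons.mp h with h | h
        · exact absurd (by rw [h]) hne
        · exact Or.inr h
    have hpos : 0 < s.countP (fun e' => e'.2.contains a) + t.countP (fun e' => e'.2.contains a) := by
      rcases hst' with h | h
      · have h2 : 0 < s.countP (fun e' => e'.2.contains a) :=
          List.countP_pos_iff.mpr ⟨e, h, hqe⟩
        omega
      · have h2 : 0 < t.countP (fun e' => e'.2.contains a) :=
          List.countP_pos_iff.mpr ⟨e, h, hqe⟩
        omega
    rw [hcnt]; push_cast; omega
  · intro hgt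
    rw [hcnt] at hgt
    have hpos : 0 < s.countP (fun e' => e'.2.contains a) + t.countP (fun e' => e'.2.contains a) := by
      push_cast at hgt; omega
    have key : ∀ e, e ∈ s ∨ e ∈ t → (fun e' : String × List String => e'.2.contains a) e = true →
        ∃ x ∈ data, (!(x.1 == p) && ((PySem.Dict.mk data).getD x.1 []).contains a) = true := by
      intro e hmem hqe
      have hmd : e ∈ data := by
        rw [hst]
        rcases hmem with h | h
        · exact List.mem_append.mpr (Or.inl h)
        · exact List.mem_append.mpr (Or.inr (List.mem_cons_of_mem _ h))
      refine ⟨e, hmd, ?_⟩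
      rw [Bool.and_eq_true, Bool.not_eq_true', beq_eq_false_iff_ne]
      refine ⟨fun hc => ?_, by rw [getD_entry' data e hnd hmd]; exact hqe⟩
      rcases hmem with h | h
      · exact hps.1 (hc ▸ List.mem_map_of_mem h)
      · exact hps.2 (hc ▸ List.mem_map_of_mem h)
    rcases Nat.lt_or_ge 0 (s.countP (fun e' => e'.2.contains a)) with h | h
    · obtain ⟨e, hme, hqe⟩ := List.countP_pos_iff.mp h
      exact key e (Or.inl hme) hqe
    · have h' : 0 < t.countP (fun e' => e'.2.contains a) := by omega
      obtain ⟨e, hme, hqe⟩ := List.countP_pos_iff.mp h'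
      exact key e (Or.inr hme) hqe

theorem rareGo_eq (data : List (String × List String)) (p : String) (l achs rare : List String)
    (hnd : (data.map Prod.fst).Nodup) (hm : (p, l) ∈ data) (hsub : ∀ a ∈ achs, a ∈ l) :
    rareGo data p achs rare = rare ++ achs.takeWhile (keepPred data l) := by
  induction achs generalizing rare with
  | nil => simp [rareGo]
  | cons a rest ih =>
    have ha : a ∈ l := hsub a (List.mem_cons_self)
    have hgd : (PySem.Dict.mk data).getD p [] = l := getD_entry data p l hnd hm
    have hcond : (is_duplicate ((PySem.Dict.mk data).getD p []) a || in_other_player data p a)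
        = !(keepPred data l a) := by
      rw [hgd, is_duplicate_eq, in_other_eq data p l a hnd hm ha, keepPred, Bool.not_not]
    by_cases hk : keepPred data l a
    · have hd : is_duplicate ((PySem.Dict.mk data).getD p []) a = false := by
        have := hcond; rw [hk] at this; simp at this; exact this.1
      have ho : in_other_player data p a = false := by
        have := hcond; rw [hk] at this; simp at this; exact this.2
      rw [rareGo]
      simp only [hd, ho, Bool.false_eq_true, if_false]
      rw [ih _ (fun x hx => hsub x (List.mem_cons_of_mem _ hx)), List.takeWhile_cons, hk]
      simp
    · have hk' : keepPred data l a = false := by simpa using hk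
      have : (is_duplicate ((PySem.Dict.mk data).getD p []) a || in_other_player data p a) = true := by
        rw [hcond, hk']; rfl
      rw [rareGo, List.takeWhile_cons, hk']
      rcases Bool.or_eq_true_iff.mp this with h | h
      · simp [h]
      · by_cases hd : is_duplicate ((PySem.Dict.mk data).getD p []) a
        · simp [hd]
        · simp [hd, h]

theorem bCollect_eq (achs : List String) (counts owners : PySem.Dict String Int)
    (rare : PySem.Set String) :
    bCollect achs counts owners rare
      = List.foldl PySem.Set.add rare
          (achs.takeWhile (fun a => !(decide (1 < counts.getD a 0) || decide (1 < owners.getD a 0)))) := by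
  induction achs generalizing rare with
  | nil => rfl
  | cons a rest ih =>
    by_cases hc : (decide (1 < counts.getD a 0) || decide (1 < owners.getD a 0)) = true
    · have hp : (!(decide (1 < counts.getD a 0) || decide (1 < owners.getD a 0))) = false := by
        rw [hc]; rfl
      have hb : bCollect (a :: rest) counts owners rare = rare := by
        simp [bCollect, hc]
      rw [hb, List.takeWhile_cons, hp]
      simp
    · have hc' : (decide (1 < counts.getD a 0) || decide (1 < owners.getD a 0)) = false := by
        simpa using hc
      simp only [bCollect, hc', Bool.false_eq_true, if_false, List.takeWhile_cons, Bool.not_false]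
      exact ih _

theorem owners_getD (data : List (String × List String)) (d : PySem.Dict String Int) (a : String) :
    (data.foldl (fun d e => (PySem.Set.ofList e.2).foldl (fun d x => d.insert x (d.getD x 0 + 1)) d) d).getD a 0
      = d.getD a 0 + ((data.countP (fun e => e.2.contains a) : Nat) : Int) := by
  induction data generalizing d with
  | nil => simp
  | cons e t ih =>
    simp only [List.foldl_cons, ih, PySem.Dict.getD_foldl_insert_add_one, List.countP_cons]
    have : ((PySem.Set.ofList e.2).count a : Int) = if (e.2.contains a) = true then 1 else 0 := by
      by_cases h : a ∈ e.2
      · rw [List.count_eq_one_of_mem (PySem.Set.nodup_ofList e.2) ((PySem.Set.mem_ofList e.2 a).mpr h)]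
        simp [h]
      · rw [List.count_eq_zero_of_not_mem (fun hc => h ((PySem.Set.mem_ofList e.2 a).mp hc))]
        simp [h]
    rw [this]
    by_cases h : a ∈ e.2 <;> simp [h] <;> ring

theorem ofList_eq_nil_iff {α : Type} [BEq α] [LawfulBEq α] (l : List α) :
    PySem.Set.ofList l = [] ↔ l = [] := by
  constructor
  · intro h
    cases l with
    | nil => rfl
    | cons x t =>
      exfalso
      have : x ∈ PySem.Set.ofList (x :: t) := (PySem.Set.mem_ofList _ _).mpr (List.mem_cons_self)
      rw [h] at this
      exact (List.not_mem_nil) this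
  · rintro rfl; rfl

-- ===== VERDICT (by name: the statement is the Claim_ definition above) =====
theorem get_rare_achievements_spec : Claim_equal_get_rare_achievements := by
  intro data _hdom hpre
  unfold Spec_get_rare_achievements
  simp only [get_rare_achievements, get_rare_achievements_alt]
  have hnd : (data.map Prod.fst).Nodup := hpre
  -- A's accumulated list is the concatenation of the kept prefixes
  have hA : data.foldl (fun rare e => rareGo data e.1 ((PySem.Dict.mk data).getD e.1 []) rare) []
      = data.flatMap (keptPrefix data) := by
    rw [PySem.List.foldl_congr_mem data _ (fun rare e => rare ++ keptPrefix data e) []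
      (fun acc e he => by
        have hm : (e.1, e.2) ∈ data := by simpa using he
        rw [getD_entry data e.1 e.2 hnd hm]
        exact rareGo_eq data e.1 e.2 e.2 acc hnd hm (fun _ h => h))]
    simpa using PySem.List.foldl_append_eq_flatMap (keptPrefix data) data []
  -- B's accumulated set is the same concatenation folded through Set.add
  have hB : data.foldl
      (fun rare e =>
        bCollect e.2 (e.2.foldl (fun d x => d.insert x (d.getD x 0 + 1)) PySem.Dict.empty)
          (data.foldl (fun d e => (PySem.Set.ofList e.2).foldl (fun d x => d.insert x (d.getD x 0 + 1)) d) PySem.Dict.empty)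
          rare)
      ([] : PySem.Set String)
      = PySem.Set.ofList (data.flatMap (keptPrefix data)) := by
    rw [PySem.List.foldl_congr_mem data _
      (fun rare e => List.foldl PySem.Set.add rare (keptPrefix data e)) []
      (fun acc e he => by
        rw [bCollect_eq]
        congr 1
        apply takeWhile_congr_mem
        intro a ha
        rw [PySem.Dict.getD_foldl_insert_add_one, owners_getD, PySem.Dict.getD_empty]
        simp [keepPred])]
    rw [← List.foldl_flatMap, PySem.Set.ofList_eq_foldl]
  rw [hA, hB]
  by_cases h : data.flatMap (keptPrefix data) = []
  · simp [h]
  · have h2 : PySem.Set.ofList (data.flatMap (keptPrefix data)) ≠ [] := by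
      intro hc; exact h ((ofList_eq_nil_iff _).mp hc)
    simp [List.isEmpty_iff, h, h2]
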